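-- pv_equiv track=rewrite | github.com/Kawser-nerd/CLCDSA | Source Codes/AtCoder/abc118/D/4925547.py | solve
-- ===== SOURCE A (Python) =====
-- def solve(n, a_list):
--     numbers_map = {1: 2, 2: 5, 3: 5, 4: 4, 5: 5, 6: 6, 7: 3, 8: 7, 9: 6}
--     usable_map = {}
--     for a in a_list:
--         usable_map[a] = numbers_map[a]
--
--     # 1-origin ????? -inf????
--     inf = 1000
--     dp = [0] + [-inf for _ in range(n)]
--     for value in usable_map.values():
--         if value <= n:
--             dp[value] = 1
--
--     # time O(NM)
--     for cost in range(1, n + 1):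
--         for value in usable_map.values():
--             if cost - value < 0 or dp[cost - value] == 0:
--                 continue
--             dp[cost] = max(
--                 dp[cost],
--                 dp[cost - value] + 1
--             )
--
--     # time O(M log(M))
--     buff = []
--     digit = n
--     reverse_usable_list = sorted(usable_map.items(), reverse=True)
--     while True:
--         for num, value in reverse_usable_list:
--             if digit - value < 0 or dp[digit] - 1 != dp[digit - value]:
--                 continue
--             buff.append(str(num))
--             digit -= value
--             break
--         if digit <= 0:
--             break
--
--     return "".join(buff)
-- ===== SOURCE B (Python) =====
-- def solve(n, a_list):
--     costs = {1: 2, 2: 5, 3: 5, 4: 4, 5: 5, 6: 6, 7: 3, 8: 7, 9: 6}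
--     usable = sorted({a: costs[a] for a in a_list}.items(), reverse=True)
--     # best[i] = largest number (as a string, compared by (length, lexicographic))
--     # writable with exactly i matchsticks; None = not writable.
--     best = [""] + [None] * max(n, 0)
--     for i in range(1, n + 1):
--         b = None
--         for d, v in usable:
--             if v <= i and best[i - v] is not None:
--                 cand = str(d) + best[i - v]
--                 if b is None or len(cand) > len(b) or (len(cand) == len(b) and cand > b):
--                     b = cand
--         best[i] = b
--     return best[n] if n > 0 else ""
-- ===== Notes on version B (the rewrite author's own statement) =====
-- stated objective: alternative
-- what changed: Replaces A's integer max-digit-count DP plus a separate greedy reconstruction walk over the dp table by a single bottom-up DP whose cells carry the answer string itself (compared by (length, lexicographic)); the reconstruction pass disappears.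
import Mathlib
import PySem

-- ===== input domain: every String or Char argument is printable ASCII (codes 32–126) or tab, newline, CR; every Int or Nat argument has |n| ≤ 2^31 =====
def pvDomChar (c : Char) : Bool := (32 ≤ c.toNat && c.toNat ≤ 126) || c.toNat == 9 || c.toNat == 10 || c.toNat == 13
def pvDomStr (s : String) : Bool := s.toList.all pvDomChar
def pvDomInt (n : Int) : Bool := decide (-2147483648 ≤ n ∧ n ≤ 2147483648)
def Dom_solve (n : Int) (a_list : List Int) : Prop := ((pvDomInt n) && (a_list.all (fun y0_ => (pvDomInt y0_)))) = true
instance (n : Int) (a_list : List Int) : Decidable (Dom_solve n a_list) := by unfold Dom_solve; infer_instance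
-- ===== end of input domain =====

-- B replaces A's integer max-digit-count DP plus separate greedy reconstruction walk by a single
-- bottom-up DP whose cells carry the answer string itself (compared by (length, lexicographic)).

-- ===== PORT A =====

-- the for-loop body of A's `while True:` reconstruction: find the first (num, value) that matches
def solveReconStep (dp : List Int) (digit : Int) : List (Int × Int) → Option (Int × Int)
  | [] => none
  | (num, value) :: rest =>
    if digit - value < 0 ∨ PySem.List.pyGetD dp digit 0 - 1 ≠ PySem.List.pyGetD dp (digit - value) 0
    then solveReconStep dp digit rest
    else some (num, value)

-- A's `while True:` loop; fuel makes it total (under Pre_solve the Python loop returns within fuel)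
def solveReconLoop (dp : List Int) (pairs : List (Int × Int)) : Nat → Int → List String → List String
  | 0, _, buff => buff
  | fuel + 1, digit, buff =>
    match solveReconStep dp digit pairs with
    | some (num, value) =>
      if digit - value ≤ 0 then buff ++ [PySem.Int.toStr num]
      else solveReconLoop dp pairs fuel (digit - value) (buff ++ [PySem.Int.toStr num])
    | none => if digit ≤ 0 then buff else solveReconLoop dp pairs fuel digit buff

def solve (n : Int) (a_list : List Int) : String :=
  let numbersMap : PySem.Dict Int Int :=
    PySem.Dict.ofList [(1, 2), (2, 5), (3, 5), (4, 4), (5, 5), (6, 6), (7, 3), (8, 7), (9, 6)]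
  -- numbers_map[a]: getD 0 — Python raises KeyError on a ∉ 1..9, excluded by Pre_solve
  let usableMap : PySem.Dict Int Int :=
    a_list.foldl (fun d a => d.insert a (numbersMap.getD a 0)) PySem.Dict.empty
  let dp : List Int := [0] ++ (PySem.List.pyRange 0 n).map (fun _ => (-1000 : Int))
  let dp := usableMap.values.foldl (fun dp v => if v ≤ n then PySem.List.pySetD dp v 1 else dp) dp
  let dp := (PySem.List.pyRange 1 (n + 1)).foldl (fun dp cost =>
    usableMap.values.foldl (fun dp value =>
      if cost - value < 0 ∨ PySem.List.pyGetD dp (cost - value) 0 = 0 then dp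
      else PySem.List.pySetD dp cost
        (max (PySem.List.pyGetD dp cost 0) (PySem.List.pyGetD dp (cost - value) 0 + 1))) dp) dp
  -- key p.1: a dict's items have pairwise-distinct first components, so sorting the pairs
  -- (Python's tuple order) and sorting by the first component coincide
  let revList := PySem.List.sorted usableMap.items (fun p => p.1) true
  PySem.Str.join "" (solveReconLoop dp revList (n.toNat + 1) n [])

-- ===== PORT B =====

-- Python's `(len(cand), cand) > (len(b), b)` on (int, str) tuples
def keyGtB (cand b : List Char) : Bool :=
  decide (b.length < cand.length ∨ (b.length = cand.length ∧ b < cand))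

-- the inner `for d, v in usable:` loop of Source B, computing the best candidate for cell i
def solveAltCell (best : List (Option (List Char))) (i : Int) (usable : List (Int × Int)) :
    Option (List Char) :=
  usable.foldl (fun b p =>
    if p.2 ≤ i then
      match PySem.List.pyGetD best (i - p.2) none, b with
      | none, _ => b
      | some t, none => some (PySem.Int.toChars p.1 ++ t)
      | some t, some bb =>
        if keyGtB (PySem.Int.toChars p.1 ++ t) bb then some (PySem.Int.toChars p.1 ++ t) else some bb
    else b) none

def solve_alt (n : Int) (a_list : List Int) : String :=
  let costs : PySem.Dict Int Int :=
    PySem.Dict.ofList [(1, 2), (2, 5), (3, 5), (4, 4), (5, 5), (6, 6), (7, 3), (8, 7), (9, 6)]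
  -- costs[a]: getD 0 — Python raises KeyError on a ∉ 1..9, excluded by Pre_solve
  let usable := PySem.List.sorted
    (a_list.foldl (fun d a => d.insert a (costs.getD a 0)) PySem.Dict.empty : PySem.Dict Int Int).items
    (fun p => p.1) true
  let best : List (Option (List Char)) := [some []] ++ List.replicate (max n 0).toNat none
  let best := (PySem.List.pyRange 1 (n + 1)).foldl
    (fun best i => PySem.List.pySetD best i (solveAltCell best i usable)) best
  -- best[n] is None only outside Pre_solve (there the Python B returns None, no string); "" here
  if n > 0 then (match PySem.List.pyGetD best n none with | some t => String.ofList t | none => "")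
  else ""

-- ===== PRECONDITION & SPEC =====

-- cost of one digit (the values of A's numbers_map)
def digitCost (d : Int) : Int :=
  if d = 1 then 2 else if d = 2 then 5 else if d = 3 then 5 else if d = 4 then 4
  else if d = 5 then 5 else if d = 6 then 6 else if d = 7 then 3 else if d = 8 then 7
  else if d = 9 then 6 else 0

-- reachTable cs i = the list [r 0, …, r i] where r j ↔ j is a sum of elements of cs
-- (a kernel-reducible table, so that Pre_solve can be decided)
def reachTable (cs : List Int) : Nat → List Bool
  | 0 => [true]
  | i + 1 =>
    let t := reachTable cs i
    t ++ [cs.any (fun v => decide (1 ≤ v) && decide (v ≤ (i + 1 : Int)) && t.getD (i + 1 - v.toNat) false)]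

-- reachCosts cs i ↔ i is a sum of (possibly repeated) elements of cs
def reachCosts (cs : List Int) (i : Nat) : Bool := (reachTable cs i).getD i false

-- Pre_solve excludes (i) digits outside 1..9, on which A raises KeyError, and (ii) positive n that is
-- not a sum of the matchstick costs of the listed digits, on which A's `while True:` loop never returns.
def Pre_solve (n : Int) (a_list : List Int) : Prop :=
  (∀ a ∈ a_list, 1 ≤ a ∧ a ≤ 9) ∧
  (n ≤ 0 ∨ reachCosts ((PySem.List.dedup a_list).map digitCost) n.toNat = true)
instance (n : Int) (a_list : List Int) : Decidable (Pre_solve n a_list) := by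
  unfold Pre_solve; infer_instance

def pvWitness_solve : Int × List Int := (11, [1, 7])

def Spec_solve (n : Int) (a_list : List Int) (out : String) : Prop := out = solve_alt n a_list
instance (n : Int) (a_list : List Int) (out : String) : Decidable (Spec_solve n a_list out) := by
  unfold Spec_solve; infer_instance

-- ===== CLAIM (what is proved, stated in full; the proofs are below) =====
def Claim_equal_solve : Prop := ∀ (n : Int) (a_list : List Int),
  Dom_solve n a_list → Pre_solve n a_list → Spec_solve n a_list (solve n a_list)

-- ===== LEMMAS AND PROOFS =====

-- (length, lexicographic) order on candidate strings, as a Prop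
def klt (a b : List Char) : Prop :=
  a.length < b.length ∨ (a.length = b.length ∧ a < b)

theorem keyGtB_iff (c b : List Char) : keyGtB c b = true ↔ klt b c := by
  simp [keyGtB, klt]

theorem klt_trans {a b c : List Char} (h1 : klt a b) (h2 : klt b c) : klt a c := by
  rcases h1 with h1 | ⟨e1, l1⟩ <;> rcases h2 with h2 | ⟨e2, l2⟩
  · exact Or.inl (h1.trans h2)
  · exact Or.inl (e2 ▸ h1)
  · exact Or.inl (e1 ▸ h2)
  · exact Or.inr ⟨e1.trans e2, l1.trans l2⟩

theorem klt_asymm {a b : List Char} (h : klt a b) : ¬ klt b a := by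
  rcases h with h | ⟨e, l⟩ <;> rintro (h' | ⟨e', l'⟩) <;> first
  | omega
  | exact absurd (l.trans l') (lt_irrefl _)

theorem klt_connex {a b : List Char} (h1 : ¬ klt a b) (h2 : ¬ klt b a) : a = b := by
  unfold klt at h1 h2
  rcases Nat.lt_trichotomy a.length b.length with h | h | h
  · exact absurd (Or.inl h) h1
  · rcases lt_trichotomy a b with h' | h' | h'
    · exact absurd (Or.inr ⟨h, h'⟩) h1
    · exact h'
    · exact absurd (Or.inr ⟨h.symm, h'⟩) h2
  · exact absurd (Or.inl h) h2

-- A's max-digit-count dp cell value, as a recursion over the matchstick count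
def dpRec (vals : List Int) (i : Nat) : Int :=
  if i = 0 then 0
  else
    vals.foldl (fun x v =>
      if h : 1 ≤ v ∧ v ≤ (i : Int) then
        (if dpRec vals (i - v.toNat) = 0 then x else max x (dpRec vals (i - v.toNat) + 1))
      else x)
      (if (i : Int) ∈ vals then 1 else -1000)
termination_by i
decreasing_by omega

-- B's best-string cell value, as a recursion over the matchstick count
def bestRec (P : List (Int × Int)) (i : Nat) : Option (List Char) :=
  if i = 0 then some []
  else
    P.foldl (fun b p =>
      if h : 1 ≤ p.2 ∧ p.2 ≤ (i : Int) then
        match bestRec P (i - p.2.toNat), b with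
        | none, _ => b
        | some t, none => some (PySem.Int.toChars p.1 ++ t)
        | some t, some bb =>
          if keyGtB (PySem.Int.toChars p.1 ++ t) bb then some (PySem.Int.toChars p.1 ++ t)
          else some bb
      else b) none
termination_by i
decreasing_by omega

theorem dpRec_zero (vals : List Int) : dpRec vals 0 = 0 := by rw [dpRec]; rfl

theorem bestRec_zero (P : List (Int × Int)) : bestRec P 0 = some [] := by rw [bestRec]; rfl

theorem dpRec_eq (vals : List Int) (i : Nat) (hi : i ≠ 0) :
    dpRec vals i = vals.foldl (fun x v =>
      if 1 ≤ v ∧ v ≤ (i : Int) ∧ dpRec vals (i - v.toNat) ≠ 0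
      then max x (dpRec vals (i - v.toNat) + 1) else x)
      (if (i : Int) ∈ vals then 1 else -1000) := by
  rw [dpRec, if_neg hi]
  apply PySem.List.foldl_congr_mem
  intro acc v _
  by_cases h1 : 1 ≤ v ∧ v ≤ (i : Int)
  · rw [dif_pos h1]
    by_cases h2 : dpRec vals (i - v.toNat) = 0
    · rw [if_pos h2, if_neg (by tauto)]
    · rw [if_neg h2, if_pos ⟨h1.1, h1.2, h2⟩]
  · rw [dif_neg h1, if_neg (by tauto)]

-- the candidate that the pair p contributes to cell i of B's dp (none = no candidate)
def bF (P : List (Int × Int)) (i : Nat) (p : Int × Int) : Option (List Char) :=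
  if 1 ≤ p.2 ∧ p.2 ≤ (i : Int)
  then (bestRec P (i - p.2.toNat)).map (fun t => PySem.Int.toChars p.1 ++ t) else none

-- generic shape of the B-side inner fold
def bstep (F : Int × Int → Option (List Char)) (b : Option (List Char)) (p : Int × Int) :
    Option (List Char) :=
  match F p, b with
  | none, _ => b
  | some t, none => some t
  | some t, some bb => if keyGtB t bb then some t else some bb

theorem bestRec_eq (P : List (Int × Int)) (i : Nat) (hi : i ≠ 0) :
    bestRec P i = P.foldl (bstep (bF P i)) none := by
  rw [bestRec, if_neg hi]
  apply PySem.List.foldl_congr_mem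
  intro acc p _
  by_cases h1 : 1 ≤ p.2 ∧ p.2 ≤ (i : Int)
  · rw [dif_pos h1]
    unfold bstep bF
    rw [if_pos h1]
    cases hb : bestRec P (i - p.2.toNat) <;> cases acc <;> simp
  · rw [dif_neg h1]
    unfold bstep bF
    rw [if_neg h1]

theorem bF_eq_some (P : List (Int × Int)) (i : Nat) (p : Int × Int) (c : List Char) :
    bF P i p = some c ↔
      1 ≤ p.2 ∧ p.2 ≤ (i : Int) ∧
        ∃ t, bestRec P (i - p.2.toNat) = some t ∧ c = PySem.Int.toChars p.1 ++ t := by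
  unfold bF
  split_ifs with h1
  · simp only [Option.map_eq_some_iff]
    constructor
    · rintro ⟨t, ht, rfl⟩; exact ⟨h1.1, h1.2, t, ht, rfl⟩
    · rintro ⟨-, -, t, ht, rfl⟩; exact ⟨t, ht, rfl⟩
  · simp only [reduceCtorEq, false_iff]
    tauto

theorem bstep_eq_none {F : Int × Int → Option (List Char)} {p : Int × Int}
    (h : F p = none) (b : Option (List Char)) : bstep F b p = b := by
  unfold bstep; rw [h]

theorem bstep_some_none {F : Int × Int → Option (List Char)} {p : Int × Int} {c : List Char}
    (h : F p = some c) : bstep F none p = some c := by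
  unfold bstep; rw [h]

theorem bstep_some_some {F : Int × Int → Option (List Char)} {p : Int × Int} {c bb : List Char}
    (h : F p = some c) :
    bstep F (some bb) p = if keyGtB c bb then some c else some bb := by
  unfold bstep; rw [h]

theorem bfold_none (F : Int × Int → Option (List Char)) (l : List (Int × Int))
    (b : Option (List Char)) :
    l.foldl (bstep F) b = none ↔ b = none ∧ ∀ p ∈ l, F p = none := by
  induction l generalizing b with
  | nil => simp
  | cons p l ih =>
    simp only [List.foldl_cons, ih, List.mem_cons]
    have hstep : bstep F b p = none ↔ b = none ∧ F p = none := by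
      unfold bstep
      cases hF : F p <;> cases b <;> simp [hF] <;> split <;> simp
    constructor
    · rintro ⟨h1, h2⟩
      rw [hstep] at h1
      exact ⟨h1.1, fun q hq => hq.elim (fun e => e ▸ h1.2) (h2 q)⟩
    · rintro ⟨h1, h2⟩
      exact ⟨hstep.mpr ⟨h1, h2 p (Or.inl rfl)⟩, fun q hq => h2 q (Or.inr hq)⟩

theorem bfold_sources (F : Int × Int → Option (List Char)) (l : List (Int × Int))
    (b : Option (List Char)) (t : List Char) (h : l.foldl (bstep F) b = some t) :
    b = some t ∨ ∃ p ∈ l, F p = some t := by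
  induction l generalizing b with
  | nil => exact Or.inl h
  | cons p l ih =>
    rcases ih (bstep F b p) h with h1 | ⟨q, hq, hFq⟩
    · rcases hF : F p with - | c
      · rw [bstep_eq_none hF] at h1
        exact Or.inl h1
      · cases b with
        | none =>
          rw [bstep_some_none hF] at h1
          exact Or.inr ⟨p, List.mem_cons_self .., hF.trans h1⟩
        | some bb =>
          rw [bstep_some_some hF] at h1
          by_cases hk : keyGtB c bb = true
          · rw [if_pos hk] at h1
            exact Or.inr ⟨p, List.mem_cons_self .., hF.trans h1⟩
          · rw [if_neg hk] at h1
            exact Or.inl h1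
    · exact Or.inr ⟨q, List.mem_cons_of_mem _ hq, hFq⟩

theorem bfold_max (F : Int × Int → Option (List Char)) (l : List (Int × Int))
    (b : Option (List Char)) (t : List Char) (h : l.foldl (bstep F) b = some t) :
    (∀ bb, b = some bb → ¬ klt t bb) ∧ (∀ p ∈ l, ∀ c, F p = some c → ¬ klt t c) := by
  induction l generalizing b with
  | nil =>
    simp only [List.foldl_nil] at h
    subst h
    exact ⟨fun bb hb => by cases hb; exact fun hk => klt_asymm hk hk, by simp⟩
  | cons p l ih =>
    obtain ⟨ih1, ih2⟩ := ih (bstep F b p) h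
    have hstep : (∀ bb, b = some bb → ¬ klt t bb) ∧ (∀ c, F p = some c → ¬ klt t c) := by
      rcases hF : F p with - | c
      · refine ⟨fun bb hb => ?_, by simp⟩
        apply ih1
        rw [bstep_eq_none hF, hb]
      · cases b with
        | none =>
          have := ih1 c (bstep_some_none hF)
          exact ⟨by simp, fun c' hc' => by cases Option.some.inj hc'; exact this⟩
        | some bb =>
          by_cases hk : keyGtB c bb = true
          · have hc : ¬ klt t c := ih1 c (by rw [bstep_some_some hF, if_pos hk])
            have hbbc : klt bb c := (keyGtB_iff c bb).mp hk
            refine ⟨fun bb' hb' => ?_, fun c' hc' => by cases Option.some.inj hc'; exact hc⟩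
            cases hb'
            exact fun hbb => hc (klt_trans hbb hbbc)
          · have hbb : ¬ klt t bb := ih1 bb (by rw [bstep_some_some hF, if_neg hk])
            have hcbb : ¬ klt bb c := fun hx => hk ((keyGtB_iff c bb).mpr hx)
            have hnc : ¬ klt t c := by
              by_cases hcb : klt c bb
              · exact fun htc => hbb (klt_trans htc hcb)
              · have hce : c = bb := klt_connex hcb hcbb
                exact hce ▸ hbb
            refine ⟨fun bb' hb' => by cases hb'; exact hbb, fun c' hc' => ?_⟩
            cases Option.some.inj hc'
            exact hnc
    refine ⟨hstep.1, fun q hq c hc => ?_⟩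
    rcases List.mem_cons.mp hq with rfl | hq
    · exact hstep.2 c hc
    · exact ih2 q hq c hc

-- generic A-side inner (scalar) max-fold
theorem maxfold_ge_init (C : Int → Prop) [DecidablePred C] (g : Int → Int) (l : List Int)
    (x : Int) : x ≤ l.foldl (fun x v => if C v then max x (g v) else x) x := by
  induction l generalizing x with
  | nil => simp
  | cons v l ih =>
    simp only [List.foldl_cons]
    refine le_trans ?_ (ih _)
    split_ifs
    · exact le_max_left _ _
    · exact le_refl _

theorem maxfold_ge (C : Int → Prop) [DecidablePred C] (g : Int → Int) (l : List Int)
    (x : Int) (v : Int) (hv : v ∈ l) (hc : C v) :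
    g v ≤ l.foldl (fun x v => if C v then max x (g v) else x) x := by
  induction l generalizing x with
  | nil => cases hv
  | cons w l ih =>
    simp only [List.foldl_cons]
    rcases List.mem_cons.mp hv with rfl | hv
    · refine le_trans ?_ (maxfold_ge_init C g l _)
      rw [if_pos hc]
      exact le_max_right _ _
    · exact ih _ hv

theorem maxfold_cases (C : Int → Prop) [DecidablePred C] (g : Int → Int) (l : List Int)
    (x : Int) :
    l.foldl (fun x v => if C v then max x (g v) else x) x = x ∨
      ∃ v ∈ l, C v ∧ l.foldl (fun x v => if C v then max x (g v) else x) x = g v := by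
  induction l generalizing x with
  | nil => exact Or.inl rfl
  | cons w l ih =>
    simp only [List.foldl_cons]
    by_cases hC : C w
    · rw [if_pos hC]
      rcases max_choice x (g w) with hm | hm <;> rw [hm]
      · rcases ih x with h | ⟨v, hv, hCv, hev⟩
        · exact Or.inl h
        · exact Or.inr ⟨v, List.mem_cons_of_mem _ hv, hCv, hev⟩
      · rcases ih (g w) with h | ⟨v, hv, hCv, hev⟩
        · exact Or.inr ⟨w, List.mem_cons_self .., hC, h⟩
        · exact Or.inr ⟨v, List.mem_cons_of_mem _ hv, hCv, hev⟩
    · rw [if_neg hC]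
      rcases ih x with h | ⟨v, hv, hCv, hev⟩
      · exact Or.inl h
      · exact Or.inr ⟨v, List.mem_cons_of_mem _ hv, hCv, hev⟩

-- digits 1..9 print as one character, in increasing character order
theorem toChars_digit (d : Int) (h1 : 1 ≤ d) (h9 : d ≤ 9) :
    PySem.Int.toChars d = [Char.ofNat (48 + d.toNat)] := by
  interval_cases d <;> decide

theorem digit_char_lt (d e : Int) (hd1 : 1 ≤ d) (hd9 : d ≤ 9) (he1 : 1 ≤ e) (he9 : e ≤ 9)
    (hlt : d < e) : Char.ofNat (48 + d.toNat) < Char.ofNat (48 + e.toNat) := by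
  interval_cases d <;> interval_cases e <;> first | omega | decide

theorem digitCost_range (d : Int) (h1 : 1 ≤ d) (h9 : d ≤ 9) :
    2 ≤ digitCost d ∧ digitCost d ≤ 7 := by
  interval_cases d <;> decide

-- ===== the main invariant: B's cell determines A's cell =====
theorem main_M (vals : List Int) (P : List (Int × Int))
    (hvP : ∀ v : Int, v ∈ vals ↔ ∃ d, (d, v) ∈ P)
    (hP : ∀ p ∈ P, (1 ≤ p.1 ∧ p.1 ≤ 9) ∧ 2 ≤ p.2 ∧ p.2 ≤ 7) (i : Nat) :
    (∀ t, bestRec P i = some t →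
      dpRec vals i = (t.length : Int) ∧ (i ≠ 0 → t ≠ []) ∧ t.length ≤ i) ∧
    (bestRec P i = none → dpRec vals i ≤ 0 ∧ 2 * dpRec vals i ≤ (i : Int) - 2001) := by
  induction i using Nat.strong_induction_on with
  | _ i ih =>
    rcases Nat.eq_zero_or_pos i with rfl | hipos
    · constructor
      · intro t ht
        rw [bestRec_zero] at ht
        cases Option.some.inj ht
        exact ⟨by simp [dpRec_zero], by simp, by simp⟩
      · intro h
        rw [bestRec_zero] at h
        cases h
    · have hne : i ≠ 0 := by omega
      have hi1 : (1 : Int) ≤ (i : Int) := by exact_mod_cast hipos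
      have hdp := dpRec_eq vals i hne
      have hinitle : (if (i : Int) ∈ vals then (1 : Int) else -1000) ≤ dpRec vals i := by
        rw [hdp]
        exact maxfold_ge_init _ _ _ _
      have hcand : ∀ v ∈ vals, (1 ≤ v ∧ v ≤ (i : Int) ∧ dpRec vals (i - v.toNat) ≠ 0) →
          dpRec vals (i - v.toNat) + 1 ≤ dpRec vals i := by
        rw [hdp]
        exact fun v hv hc => maxfold_ge _ _ _ _ v hv hc
      constructor
      · intro t ht
        have htf := ht
        rw [bestRec_eq P i hne] at htf
        rcases bfold_sources _ _ _ _ htf with h1 | ⟨p, hpP, hFp⟩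
        · cases h1
        obtain ⟨hmax0, hmax⟩ := bfold_max _ _ _ _ htf
        rw [bF_eq_some] at hFp
        obtain ⟨hp1, hp2, t', ht', rfl⟩ := hFp
        obtain ⟨⟨hd1, hd9⟩, hv2, hv7⟩ := hP p hpP
        have hchar := toChars_digit p.1 hd1 hd9
        have hlen_t : (PySem.Int.toChars p.1 ++ t').length = t'.length + 1 := by
          rw [hchar]
          simp
        have ihp := ih (i - p.2.toNat) (by omega)
        have hdp_pred : dpRec vals (i - p.2.toNat) = (t'.length : Int) := (ihp.1 t' ht').1
        have hlen_le : t'.length ≤ i - p.2.toNat := (ihp.1 t' ht').2.2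
        have hmemv : p.2 ∈ vals := (hvP p.2).mpr ⟨p.1, by simpa using hpP⟩
        have hge : ((PySem.Int.toChars p.1 ++ t').length : Int) ≤ dpRec vals i := by
          rw [hlen_t]
          rcases Nat.eq_zero_or_pos t'.length with hz | hpos'
          · have ht'e : t' = [] := List.length_eq_zero_iff.mp hz
            subst ht'e
            have hz2 : i - p.2.toNat = 0 := by
              by_contra hzz
              exact ((ihp.1 [] ht').2.1 hzz) rfl
            have hiv : (i : Int) ∈ vals := by
              have : (i : Int) = p.2 := by omega
              rw [this]
              exact hmemv
            rw [if_pos hiv] at hinitle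
            push_cast
            omega
          · have hC : 1 ≤ p.2 ∧ p.2 ≤ (i : Int) ∧ dpRec vals (i - p.2.toNat) ≠ 0 := by
              refine ⟨by omega, hp2, ?_⟩
              rw [hdp_pred]
              exact_mod_cast by omega
            have := hcand p.2 hmemv hC
            rw [hdp_pred] at this
            push_cast
            omega
        have hle : dpRec vals i ≤ ((PySem.Int.toChars p.1 ++ t').length : Int) := by
          have h1le : (1 : Int) ≤ ((PySem.Int.toChars p.1 ++ t').length : Int) := by
            rw [hlen_t]
            push_cast
            omega
          have hlen0 : (0 : Int) ≤ ((PySem.Int.toChars p.1 ++ t').length : Int) := by omega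
          rw [hdp]
          rcases maxfold_cases (fun v => 1 ≤ v ∧ v ≤ (i : Int) ∧ dpRec vals (i - v.toNat) ≠ 0)
            (fun v => dpRec vals (i - v.toNat) + 1) vals
            (if (i : Int) ∈ vals then 1 else -1000) with hcase | ⟨v, hvv, hC, heq⟩
          · rw [hcase]
            split_ifs <;> omega
          · rw [heq]
            obtain ⟨d', hd'⟩ := (hvP v).mp hvv
            have hv1' := hC.1
            have hvle' := hC.2.1
            have ihq := ih (i - v.toNat) (by omega)
            cases hbq : bestRec P (i - v.toNat) with
            | some s =>
              have hdq : dpRec vals (i - v.toNat) = (s.length : Int) := (ihq.1 s hbq).1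
              have hq9 := hP (d', v) hd'
              have hchar' := toChars_digit d' hq9.1.1 hq9.1.2
              have hF' : bF P i (d', v) = some (PySem.Int.toChars d' ++ s) := by
                rw [bF_eq_some]
                exact ⟨hC.1, hC.2.1, s, hbq, rfl⟩
              have hnk := hmax (d', v) hd' _ hF'
              have hnlt : ¬ ((PySem.Int.toChars p.1 ++ t').length <
                  (PySem.Int.toChars d' ++ s).length) := fun hlt => hnk (Or.inl hlt)
              have hslen : (PySem.Int.toChars d' ++ s).length = s.length + 1 := by
                rw [hchar']
                simp
              rw [hdq]
              have : s.length + 1 ≤ (PySem.Int.toChars p.1 ++ t').length := by omega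
              push_cast
              omega
            | none =>
              obtain ⟨hq0, -⟩ := ihq.2 hbq
              have hne0 := hC.2.2
              omega
        refine ⟨le_antisymm hle hge, fun _ => by rw [hchar]; simp, ?_⟩
        rw [hlen_t]
        omega
      · intro hnone
        have hnf := hnone
        rw [bestRec_eq P i hne] at hnf
        have hall := ((bfold_none _ _ _).mp hnf).2
        have hbase : (i : Int) ∉ vals := by
          intro hiv
          obtain ⟨d, hdP⟩ := (hvP _).mp hiv
          have hFd := hall (d, (i : Int)) hdP
          unfold bF at hFd
          rw [if_pos (show (1 : Int) ≤ (d, (i : Int)).2 ∧ (d, (i : Int)).2 ≤ (i : Int) from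
            ⟨hi1, le_refl _⟩)] at hFd
          simp only [Int.toNat_natCast, Nat.sub_self, bestRec_zero, Option.map_some] at hFd
          cases hFd
        rw [hdp]
        rcases maxfold_cases (fun v => 1 ≤ v ∧ v ≤ (i : Int) ∧ dpRec vals (i - v.toNat) ≠ 0)
          (fun v => dpRec vals (i - v.toNat) + 1) vals
          (if (i : Int) ∈ vals then 1 else -1000) with hcase | ⟨v, hvv, hC, heq⟩
        · rw [hcase, if_neg hbase]
          constructor <;> omega
        · rw [heq]
          obtain ⟨d', hd'⟩ := (hvP v).mp hvv
          have hv1' := hC.1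
          have hvle' := hC.2.1
          have ihq := ih (i - v.toNat) (by omega)
          have hbq : bestRec P (i - v.toNat) = none := by
            cases hbq : bestRec P (i - v.toNat) with
            | none => rfl
            | some s =>
              exfalso
              have hFd := hall (d', v) hd'
              unfold bF at hFd
              rw [if_pos (show (1 : Int) ≤ (d', v).2 ∧ (d', v).2 ≤ (i : Int) from
                ⟨hC.1, hC.2.1⟩)] at hFd
              simp only [hbq, Option.map_some] at hFd
              cases hFd
          obtain ⟨hq0, hq2⟩ := ihq.2 hbq
          have hne0 := hC.2.2
          have hv2' := (hP (d', v) hd').2.1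
          have hcast : ((i - v.toNat : Nat) : Int) = (i : Int) - v := by omega
          rw [hcast] at hq2
          constructor <;> omega

-- value read from the dp table written as a map over List.range
theorem getD_map_range {β : Type} (g : Nat → β) (m : Nat) (i : Int) (dflt : β)
    (h0 : 0 ≤ i) (h : i < (m : Int)) :
    PySem.List.pyGetD ((List.range m).map g) i dflt = g i.toNat := by
  rw [PySem.List.pyGetD_eq_getElem _ dflt h0 (by simpa using h)]
  have hm : i.toNat < m := by omega
  simp [hm]

-- A's reconstruction scan returns none when every cost is too large (the n ≤ 0 exit)
theorem reconStep_none (dp : List Int) (digit : Int) (l : List (Int × Int))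
    (h : ∀ p ∈ l, digit - p.2 < 0) : solveReconStep dp digit l = none := by
  induction l with
  | nil => rfl
  | cons p l ih =>
    obtain ⟨num, value⟩ := p
    rw [solveReconStep, if_pos (Or.inl (h _ (List.mem_cons_self ..)))]
    exact ih fun q hq => h q (List.mem_cons_of_mem _ hq)

-- A's reconstruction scan returns the first matching pair
theorem reconStep_first (dp : List Int) (digit : Int) (l : List (Int × Int)) (p0 : Int × Int)
    (h0 : p0 ∈ l) (hpair : l.Pairwise (fun a b => b.1 < a.1))
    (hm : ¬ (digit - p0.2 < 0 ∨
      PySem.List.pyGetD dp digit 0 - 1 ≠ PySem.List.pyGetD dp (digit - p0.2) 0))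
    (hbefore : ∀ q ∈ l, p0.1 < q.1 →
      (digit - q.2 < 0 ∨ PySem.List.pyGetD dp digit 0 - 1 ≠ PySem.List.pyGetD dp (digit - q.2) 0)) :
    solveReconStep dp digit l = some p0 := by
  induction l with
  | nil => cases h0
  | cons q l ih =>
    obtain ⟨num, value⟩ := q
    rcases List.mem_cons.mp h0 with rfl | h0
    · rw [solveReconStep, if_neg hm]
    · have hlt : p0.1 < num := (List.pairwise_cons.mp hpair).1 p0 h0
      have hcond := hbefore (num, value) (List.mem_cons_self ..) hlt
      rw [solveReconStep, if_pos hcond]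
      exact ih h0 (List.pairwise_cons.mp hpair).2
        (fun q hq hlt' => hbefore q (List.mem_cons_of_mem _ hq) hlt')

-- at a reachable cell the reconstruction scan picks exactly the head of B's best string
theorem recon_step_eq (n : Int) (vals : List Int) (P : List (Int × Int))
    (hvP : ∀ v : Int, v ∈ vals ↔ ∃ d, (d, v) ∈ P)
    (hP : ∀ p ∈ P, (1 ≤ p.1 ∧ p.1 ≤ 9) ∧ 2 ≤ p.2 ∧ p.2 ≤ 7)
    (hdesc : P.Pairwise (fun p q => q.1 < p.1))
    (i : Nat) (hi : 0 < i) (hin : (i : Int) ≤ n) (t : List Char)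
    (hb : bestRec P i = some t) :
    ∃ (d v : Int) (t' : List Char),
      t = PySem.Int.toChars d ++ t' ∧ (d, v) ∈ P ∧ 2 ≤ v ∧ v ≤ (i : Int) ∧
      solveReconStep ((List.range (n.toNat + 1)).map (dpRec vals)) (i : Int) P = some (d, v) ∧
      bestRec P (i - v.toNat) = some t' := by
  have hne : i ≠ 0 := by omega
  have htf := hb
  rw [bestRec_eq P i hne] at htf
  rcases bfold_sources _ _ _ _ htf with h1 | ⟨p, hpP, hFp⟩
  · cases h1
  obtain ⟨-, hmax⟩ := bfold_max _ _ _ _ htf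
  rw [bF_eq_some] at hFp
  obtain ⟨hp1, hp2, t', ht', rfl⟩ := hFp
  obtain ⟨⟨hd1, hd9⟩, hv2, hv7⟩ := hP p hpP
  have hM := main_M vals P hvP hP
  have hdpi : dpRec vals i = ((PySem.Int.toChars p.1 ++ t').length : Int) := ((hM i).1 _ hb).1
  have hdp_pred : dpRec vals (i - p.2.toNat) = (t'.length : Int) := ((hM _).1 t' ht').1
  have hchar := toChars_digit p.1 hd1 hd9
  have hlent : (PySem.Int.toChars p.1 ++ t').length = t'.length + 1 := by rw [hchar]; simp
  have hdpi' : dpRec vals i = (t'.length : Int) + 1 := by rw [hdpi, hlent]; push_cast; ring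
  have hn0 : (1 : Int) ≤ n := by omega
  have hread : ∀ (w : Int), 0 ≤ w → w ≤ (i : Int) →
      PySem.List.pyGetD ((List.range (n.toNat + 1)).map (dpRec vals)) w 0 =
        dpRec vals w.toNat := by
    intro w h0 h1
    exact getD_map_range _ _ _ _ h0 (by push_cast; omega)
  have hreadi : PySem.List.pyGetD ((List.range (n.toNat + 1)).map (dpRec vals)) (i : Int) 0 =
      dpRec vals i := by
    rw [hread (i : Int) (by omega) (le_refl _)]
    simp
  refine ⟨p.1, p.2, t', rfl, by simpa using hpP, hv2, hp2, ?_, ht'⟩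
  apply reconStep_first _ _ _ (p.1, p.2) (by simpa using hpP) hdesc
  · rintro (hx | hx) <;> dsimp only at hx
    · omega
    · apply hx
      rw [hreadi, hread ((i : Int) - p.2) (by omega) (by omega),
        show ((i : Int) - p.2).toNat = i - p.2.toNat by omega, hdpi', hdp_pred]
      ring
  · intro q hqP hlt
    obtain ⟨⟨he1, he9⟩, hw2, hw7⟩ := hP q hqP
    by_cases hqc : (i : Int) - q.2 < 0
    · exact Or.inl hqc
    · refine Or.inr ?_
      rw [hreadi, hread ((i : Int) - q.2) (by omega) (by omega),
        show ((i : Int) - q.2).toNat = i - q.2.toNat by omega]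
      intro hx
      cases hbq : bestRec P (i - q.2.toNat) with
      | some s =>
        have hds : dpRec vals (i - q.2.toNat) = (s.length : Int) := ((hM _).1 s hbq).1
        have hchar' := toChars_digit q.1 he1 he9
        have hF' : bF P i q = some (PySem.Int.toChars q.1 ++ s) := by
          rw [bF_eq_some]
          exact ⟨by omega, by omega, s, hbq, rfl⟩
        have hnk := hmax q hqP _ hF'
        apply hnk
        have hlen' : (PySem.Int.toChars q.1 ++ s).length = s.length + 1 := by
          rw [hchar']
          simp
        have hleneq : (PySem.Int.toChars p.1 ++ t').length =
            (PySem.Int.toChars q.1 ++ s).length := by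
          omega
        refine Or.inr ⟨hleneq, ?_⟩
        rw [hchar, hchar']
        exact List.Lex.rel (digit_char_lt p.1 q.1 hd1 hd9 he1 he9 (by simpa using hlt))
      | none =>
        obtain ⟨hq0, hq2⟩ := (hM _).2 hbq
        have ht'0 : t'.length = 0 := by omega
        have ht'e : t' = [] := List.length_eq_zero_iff.mp ht'0
        have hz2 : i - p.2.toNat = 0 := by
          by_contra hzz
          exact ((hM _).1 t' ht').2.1 hzz ht'e
        have hcast : ((i - q.2.toNat : Nat) : Int) = (i : Int) - q.2 := by omega
        rw [hcast] at hq2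
        omega

theorem recon_loop (n : Int) (vals : List Int) (P : List (Int × Int))
    (hvP : ∀ v : Int, v ∈ vals ↔ ∃ d, (d, v) ∈ P)
    (hP : ∀ p ∈ P, (1 ≤ p.1 ∧ p.1 ≤ 9) ∧ 2 ≤ p.2 ∧ p.2 ≤ 7)
    (hdesc : P.Pairwise (fun p q => q.1 < p.1)) :
    ∀ (t : List Char) (i : Nat) (buff : List String) (fuel : Nat),
      bestRec P i = some t → 0 < i → (i : Int) ≤ n → t.length ≤ fuel →
      solveReconLoop ((List.range (n.toNat + 1)).map (dpRec vals)) P fuel (i : Int) buff =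
        buff ++ t.map (fun ch => String.ofList [ch]) := by
  intro t
  induction t with
  | nil =>
    intro i buff fuel ht h0i hin hfl
    exact absurd rfl (((main_M vals P hvP hP i).1 [] ht).2.1 (by omega))
  | cons ch t0 ihl =>
    intro i buff fuel ht h0i hin hfl
    obtain ⟨d, v, t', hdec, hdvP, hv2, hvle, hstep, ht'⟩ :=
      recon_step_eq n vals P hvP hP hdesc i h0i hin _ ht
    have hq := hP (d, v) hdvP
    have hchar := toChars_digit d hq.1.1 hq.1.2
    rw [hchar] at hdec
    obtain ⟨hc, ht0⟩ := List.cons.inj hdec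
    subst ht0
    subst hc
    have htostr : PySem.Int.toStr d = String.ofList [Char.ofNat (48 + d.toNat)] := by
      apply String.toList_inj.mp
      rw [String.toList_ofList, PySem.Int.toList_toStr, hchar]
    cases fuel with
    | zero => simp at hfl
    | succ f =>
      rw [solveReconLoop, hstep]
      dsimp only
      by_cases hz : (i : Int) - v ≤ 0
      · rw [if_pos hz]
        have hiz : i - v.toNat = 0 := by omega
        rw [hiz, bestRec_zero] at ht'
        cases Option.some.inj ht'
        rw [htostr]
        simp
      · rw [if_neg hz]
        have hieq : ((i - v.toNat : Nat) : Int) = (i : Int) - v := by omega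
        have hrec := ihl (i - v.toNat) (buff ++ [PySem.Int.toStr d]) f ht'
          (by omega) (by omega) (by simp at hfl ⊢; omega)
        rw [hieq] at hrec
        rw [hrec, htostr]
        simp

-- ===== table lemmas: the ports' imperative lists equal the recursions =====

theorem pyRange_nil (a b : Int) (h : b ≤ a) : PySem.List.pyRange a b = [] := by
  have := PySem.List.length_pyRange_one a b
  rw [show (b - a).toNat = 0 by omega] at this
  exact List.eq_nil_of_length_eq_zero this

theorem preset_fold (n : Int) (l : List Int) (hl : ∀ v ∈ l, 2 ≤ v ∧ v ≤ 7) (L : List Int)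
    (hlen : L.length = n.toNat + 1) :
    (l.foldl (fun dp v => if v ≤ n then PySem.List.pySetD dp v 1 else dp) L).length = L.length ∧
    ∀ j : Nat, j < L.length →
      (l.foldl (fun dp v => if v ≤ n then PySem.List.pySetD dp v 1 else dp) L)[j]? =
        if (j : Int) ∈ l ∧ (j : Int) ≤ n then some 1 else L[j]? := by
  induction l generalizing L with
  | nil => exact ⟨rfl, fun j _ => by simp⟩
  | cons v l ih =>
    have hv := hl v (List.mem_cons_self ..)
    have hstep :
        (if v ≤ n then PySem.List.pySetD L v 1 else L).length = L.length := by
      split_ifs <;> simp [PySem.List.length_pySetD]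
    obtain ⟨ihlen, ihcells⟩ := ih (fun w hw => hl w (List.mem_cons_of_mem _ hw))
      (if v ≤ n then PySem.List.pySetD L v 1 else L) (by rw [hstep, hlen])
    simp only [List.foldl_cons]
    refine ⟨by rw [ihlen, hstep], fun j hj => ?_⟩
    rw [ihcells j (by rw [hstep]; exact hj)]
    by_cases hjl : (j : Int) ∈ l ∧ (j : Int) ≤ n
    · rw [if_pos hjl,
        if_pos (show (j : Int) ∈ v :: l ∧ (j : Int) ≤ n from ⟨List.mem_cons_of_mem _ hjl.1, hjl.2⟩)]
    · rw [if_neg hjl]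
      by_cases hjv : (j : Int) = v ∧ (j : Int) ≤ n
      · have hmem : (j : Int) ∈ v :: l := by rw [hjv.1]; exact List.mem_cons_self
        rw [if_pos (show (j : Int) ∈ v :: l ∧ (j : Int) ≤ n from ⟨hmem, hjv.2⟩),
          if_pos (show v ≤ n by omega)]
        rw [PySem.List.pySetD_of_nonneg L 1 (show (0 : Int) ≤ v by omega)]
        rw [show v.toNat = j by omega]
        rw [List.getElem?_set_self (by omega)]
      · have hcond : ¬ ((j : Int) ∈ v :: l ∧ (j : Int) ≤ n) := by
          rintro ⟨hm, hle⟩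
          rcases List.mem_cons.mp hm with he | hm
          · exact hjv ⟨he, hle⟩
          · exact hjl ⟨hm, hle⟩
        rw [if_neg hcond]
        split_ifs with hvn
        · rw [PySem.List.pySetD_of_nonneg L 1 (show (0 : Int) ≤ v by omega)]
          rw [List.getElem?_set_ne (by omega)]
        · rfl

theorem outer_table {β : Type} (n1 : Nat) (r init : Nat → β) (F : List β → Int → List β)
    (L0 : List β) (hL0len : L0.length = n1 + 1) (hL0 : ∀ j : Nat, j ≤ n1 → L0[j]? = some (init j))
    (h0 : init 0 = r 0)
    (hF : ∀ (c : Nat) (L : List β), 1 ≤ c → c ≤ n1 → L.length = n1 + 1 →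
      (∀ j : Nat, j < c → L[j]? = some (r j)) →
      (∀ j : Nat, c ≤ j → j ≤ n1 → L[j]? = some (init j)) →
      F L (c : Int) = PySem.List.pySetD L (c : Int) (r c)) :
    ∀ c : Nat, c ≤ n1 →
      ((PySem.List.pyRange 1 ((c : Int) + 1)).foldl F L0).length = n1 + 1 ∧
      ∀ j : Nat, j ≤ n1 →
        ((PySem.List.pyRange 1 ((c : Int) + 1)).foldl F L0)[j]? =
          some (if j ≤ c then r j else init j) := by
  intro c
  induction c with
  | zero =>
    intro _
    rw [show ((0 : Nat) : Int) + 1 = 1 by norm_num, pyRange_nil 1 1 (le_refl _)]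
    refine ⟨hL0len, fun j hj => ?_⟩
    simp only [List.foldl_nil]
    rw [hL0 j hj]
    by_cases hj0 : j ≤ 0
    · rw [if_pos hj0, show j = 0 by omega, h0]
    · rw [if_neg hj0]
  | succ c ihc =>
    intro hc
    obtain ⟨ihlen, ihcells⟩ := ihc (by omega)
    have hsplit : PySem.List.pyRange 1 (((c + 1 : Nat) : Int) + 1) =
        PySem.List.pyRange 1 ((c : Int) + 1) ++ [((c + 1 : Nat) : Int)] := by
      rw [PySem.List.pyRange_one_append 1 ((c : Int) + 1) (((c + 1 : Nat) : Int) + 1)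
        (by omega) (by push_cast; omega)]
      congr 1
      rw [PySem.List.pyRange_one_cons (by push_cast; omega)]
      rw [pyRange_nil _ _ (by push_cast; omega)]
      push_cast
      norm_num
    rw [hsplit, List.foldl_append, List.foldl_cons, List.foldl_nil]
    set L := (PySem.List.pyRange 1 ((c : Int) + 1)).foldl F L0 with hL
    have hFc := hF (c + 1) L (by omega) hc ihlen
      (fun j hj => by rw [ihcells j (by omega), if_pos (by omega)])
      (fun j hj1 hj2 => by rw [ihcells j hj2, if_neg (by omega)])
    rw [hFc, PySem.List.pySetD_natCast]
    refine ⟨by rw [List.length_set, ihlen], fun j hj => ?_⟩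
    by_cases hje : j = c + 1
    · subst hje
      rw [List.getElem?_set_self (by omega), if_pos (le_refl _)]
    · rw [List.getElem?_set_ne (by omega), ihcells j hj]
      by_cases hjc : j ≤ c
      · rw [if_pos hjc, if_pos (by omega)]
      · rw [if_neg hjc, if_neg (by omega)]

theorem innerA (n1 : Nat) (vals : List Int) (c : Nat) (hc1 : 1 ≤ c) :
    ∀ (l : List Int), (∀ v ∈ l, 2 ≤ v ∧ v ≤ 7) →
    ∀ (L : List Int), L.length = n1 + 1 → c ≤ n1 →
      (∀ j : Nat, j < c → L[j]? = some (dpRec vals j)) →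
      (l.foldl (fun dp value =>
        if (c : Int) - value < 0 ∨ PySem.List.pyGetD dp ((c : Int) - value) 0 = 0 then dp
        else PySem.List.pySetD dp (c : Int)
          (max (PySem.List.pyGetD dp (c : Int) 0) (PySem.List.pyGetD dp ((c : Int) - value) 0 + 1))) L)
      = PySem.List.pySetD L (c : Int)
          (l.foldl (fun x v =>
            if 1 ≤ v ∧ v ≤ (c : Int) ∧ dpRec vals (c - v.toNat) ≠ 0
            then max x (dpRec vals (c - v.toNat) + 1) else x) (PySem.List.pyGetD L (c : Int) 0)) := by
  intro l
  induction l with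
  | nil =>
    intro _ L hlen hcn _
    simp only [List.foldl_nil, PySem.List.pySetD_natCast, PySem.List.pyGetD_natCast]
    rw [List.getD_eq_getElem?_getD, List.getElem?_eq_getElem (by omega), Option.getD_some]
    rw [List.set_getElem_self]
  | cons v l ihl =>
    intro hl L hlen hcn hcells
    have hv := hl v List.mem_cons_self
    have ihl' := ihl (fun w hw => hl w (List.mem_cons_of_mem _ hw))
    simp only [List.foldl_cons]
    by_cases hvc : v ≤ (c : Int)
    · -- the read cell is below c and equals dpRec
      have hidx : (c : Int) - v = ((c - v.toNat : Nat) : Int) := by omega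
      have hlt : c - v.toNat < c := by omega
      have hread : PySem.List.pyGetD L ((c : Int) - v) 0 = dpRec vals (c - v.toNat) := by
        rw [hidx, PySem.List.pyGetD_natCast, List.getD_eq_getElem?_getD, hcells _ hlt,
          Option.getD_some]
      by_cases hz : dpRec vals (c - v.toNat) = 0
      · rw [if_pos (Or.inr (by rw [hread]; exact hz)),
          if_neg (by rintro ⟨-, -, hx⟩; exact hx hz)]
        exact ihl' L hlen hcn hcells
      · rw [if_neg (by
            rintro (hx | hx)
            · omega
            · rw [hread] at hx; exact hz hx)]
        rw [if_pos ⟨by omega, hvc, hz⟩]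
        rw [hread]
        have hclen : c < L.length := by omega
        have hLget : PySem.List.pyGetD L (c : Int) 0 = L[c] := by
          rw [PySem.List.pyGetD_natCast, List.getD_eq_getElem?_getD,
            List.getElem?_eq_getElem hclen, Option.getD_some]
        set x1 := max (PySem.List.pyGetD L (c : Int) 0) (dpRec vals (c - v.toNat) + 1) with hx1
        have := ihl' (PySem.List.pySetD L (c : Int) x1)
          (by rw [PySem.List.length_pySetD, hlen])
          hcn
          (fun j hj => by
            rw [PySem.List.pySetD_natCast, List.getElem?_set_ne (by omega)]
            exact hcells j hj)
        rw [this]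
        rw [PySem.List.pySetD_natCast, PySem.List.pySetD_natCast, PySem.List.pySetD_natCast,
          List.set_set]
        congr 1
        rw [PySem.List.pyGetD_natCast, List.getD_eq_getElem?_getD,
          List.getElem?_set_self hclen, Option.getD_some]
    · rw [if_pos (Or.inl (by omega)), if_neg (by rintro ⟨-, hx, -⟩; exact hvc hx)]
      exact ihl' L hlen hcn hcells

theorem innerB (P : List (Int × Int)) (hP : ∀ p ∈ P, 2 ≤ p.2 ∧ p.2 ≤ 7)
    (c : Nat) (hc1 : 1 ≤ c) (L : List (Option (List Char)))
    (hcells : ∀ j : Nat, j < c → L[j]? = some (bestRec P j)) :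
    solveAltCell L (c : Int) P = bestRec P c := by
  rw [bestRec_eq P c (by omega)]
  unfold solveAltCell
  apply PySem.List.foldl_congr_mem
  intro b p hp
  obtain ⟨h2, h7⟩ := hP p hp
  by_cases hpc : p.2 ≤ (c : Int)
  · rw [if_pos hpc]
    have hidx : (c : Int) - p.2 = ((c - p.2.toNat : Nat) : Int) := by omega
    have hlt : c - p.2.toNat < c := by omega
    have hread : PySem.List.pyGetD L ((c : Int) - p.2) none = bestRec P (c - p.2.toNat) := by
      rw [hidx, PySem.List.pyGetD_natCast, List.getD_eq_getElem?_getD, hcells _ hlt,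
        Option.getD_some]
    rw [hread]
    unfold bstep bF
    rw [if_pos ⟨by omega, hpc⟩]
    cases hb : bestRec P (c - p.2.toNat) <;> cases b <;> simp
  · rw [if_neg hpc]
    unfold bstep bF
    rw [if_neg (by rintro ⟨-, hx⟩; exact hpc hx)]

-- the dp list A builds is the table of dpRec, and the best list B builds is the table of bestRec
theorem dpList_eq (n : Int) (hn : 1 ≤ n) (vals : List Int) (hvals : ∀ v ∈ vals, 2 ≤ v ∧ v ≤ 7) :
    ((PySem.List.pyRange 1 (n + 1)).foldl (fun dp cost =>
      vals.foldl (fun dp value =>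
        if cost - value < 0 ∨ PySem.List.pyGetD dp (cost - value) 0 = 0 then dp
        else PySem.List.pySetD dp cost
          (max (PySem.List.pyGetD dp cost 0) (PySem.List.pyGetD dp (cost - value) 0 + 1))) dp)
      (vals.foldl (fun dp v => if v ≤ n then PySem.List.pySetD dp v 1 else dp)
        ([0] ++ (PySem.List.pyRange 0 n).map (fun _ => (-1000 : Int)))))
    = (List.range (n.toNat + 1)).map (dpRec vals) := by
  set n1 := n.toNat with hn1
  set base : List Int := [0] ++ (PySem.List.pyRange 0 n).map (fun _ => (-1000 : Int)) with hbase
  set init : Nat → Int := fun j => if j = 0 then 0 else if (j : Int) ∈ vals then 1 else -1000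
    with hinit
  have hbaselen : base.length = n1 + 1 := by
    rw [hbase]
    simp [PySem.List.length_pyRange_one]
    omega
  have hbasecells : ∀ j : Nat, j ≤ n1 → base[j]? =
      some (if j = 0 then (0 : Int) else -1000) := by
    intro j hj
    rw [hbase]
    cases j with
    | zero => rfl
    | succ j =>
      rw [show ([(0 : Int)] ++ (PySem.List.pyRange 0 n).map (fun _ => (-1000 : Int))) =
        (0 : Int) :: (PySem.List.pyRange 0 n).map (fun _ => (-1000 : Int)) from rfl]
      rw [List.getElem?_cons_succ, if_neg (by omega)]
      rw [List.getElem?_eq_getElem (by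
        rw [List.length_map, PySem.List.length_pyRange_one]; omega)]
      simp
  set L0 : List Int := vals.foldl (fun dp v => if v ≤ n then PySem.List.pySetD dp v 1 else dp) base
    with hL0
  obtain ⟨hplen, hpcells⟩ := preset_fold n vals hvals base hbaselen
  have hL0len : L0.length = n1 + 1 := by rw [hL0, hplen, hbaselen]
  have hL0cells : ∀ j : Nat, j ≤ n1 → L0[j]? = some (init j) := by
    intro j hj
    simp only [hinit]
    rw [hL0, hpcells j (by omega)]
    by_cases hjv : (j : Int) ∈ vals
    · have hj2 : 2 ≤ (j : Int) := (hvals _ hjv).1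
      rw [if_pos (show (j : Int) ∈ vals ∧ (j : Int) ≤ n from ⟨hjv, by omega⟩),
        if_neg (show ¬ j = 0 by omega), if_pos hjv]
    · rw [if_neg (by tauto), hbasecells j hj]
      by_cases hj0 : j = 0
      · simp [hj0]
      · simp [hj0, hjv]
  have h0 : init 0 = dpRec vals 0 := by simp [hinit, dpRec_zero]
  have hF : ∀ (c : Nat) (L : List Int), 1 ≤ c → c ≤ n1 → L.length = n1 + 1 →
      (∀ j : Nat, j < c → L[j]? = some (dpRec vals j)) →
      (∀ j : Nat, c ≤ j → j ≤ n1 → L[j]? = some (init j)) →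
      (fun dp cost =>
        vals.foldl (fun dp value =>
          if cost - value < 0 ∨ PySem.List.pyGetD dp (cost - value) 0 = 0 then dp
          else PySem.List.pySetD dp cost
            (max (PySem.List.pyGetD dp cost 0) (PySem.List.pyGetD dp (cost - value) 0 + 1))) dp)
        L (c : Int) = PySem.List.pySetD L (c : Int) (dpRec vals c) := by
    intro c L hc1 hcn hlen hcellsR hcellsI
    beta_reduce
    have := innerA n1 vals c hc1 vals hvals L hlen hcn hcellsR
    rw [this]
    congr 1
    have hLc : PySem.List.pyGetD L (c : Int) 0 = init c := by
      rw [PySem.List.pyGetD_natCast, List.getD_eq_getElem?_getD, hcellsI c (le_refl _) hcn,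
        Option.getD_some]
    rw [hLc]
    simp only [hinit]
    rw [if_neg (by omega), ← dpRec_eq vals c (by omega)]
  have hmain := outer_table n1 (dpRec vals) init
    (fun dp cost =>
      vals.foldl (fun dp value =>
        if cost - value < 0 ∨ PySem.List.pyGetD dp (cost - value) 0 = 0 then dp
        else PySem.List.pySetD dp cost
          (max (PySem.List.pyGetD dp cost 0) (PySem.List.pyGetD dp (cost - value) 0 + 1))) dp)
    L0 hL0len hL0cells h0 hF n1 (le_refl _)
  have hrange : (n : Int) + 1 = ((n1 : Int) + 1) := by omega
  rw [hrange]
  apply List.ext_getElem?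
  intro j
  rcases Nat.lt_or_ge j (n1 + 1) with hj | hj
  · rw [hmain.2 j (by omega), if_pos (by omega)]
    rw [List.getElem?_eq_getElem (by simp; omega)]
    simp
  · rw [List.getElem?_eq_none (by rw [hmain.1]; omega),
      List.getElem?_eq_none (by simp; omega)]

theorem bestList_eq (n : Int) (hn : 1 ≤ n) (P : List (Int × Int))
    (hP : ∀ p ∈ P, 2 ≤ p.2 ∧ p.2 ≤ 7) :
    ((PySem.List.pyRange 1 (n + 1)).foldl
      (fun best i => PySem.List.pySetD best i (solveAltCell best i P))
      ([some []] ++ List.replicate (max n 0).toNat none))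
    = (List.range (n.toNat + 1)).map (bestRec P) := by
  set n1 := n.toNat with hn1
  set init : Nat → Option (List Char) := fun j => if j = 0 then some [] else none with hinit
  set L0 : List (Option (List Char)) := [some []] ++ List.replicate (max n 0).toNat none with hL0
  have hL0len : L0.length = n1 + 1 := by
    rw [hL0]
    simp
    omega
  have hL0cells : ∀ j : Nat, j ≤ n1 → L0[j]? = some (init j) := by
    intro j hj
    simp only [hinit]
    rw [hL0]
    cases j with
    | zero => rfl
    | succ j =>
      rw [show ([some []] ++ List.replicate (max n 0).toNat (none : Option (List Char))) =
        some [] :: List.replicate (max n 0).toNat none from rfl]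
      rw [List.getElem?_cons_succ, if_neg (by omega)]
      rw [List.getElem?_eq_getElem (by simp; omega)]
      simp
  have h0 : init 0 = bestRec P 0 := by simp [hinit, bestRec_zero]
  have hF : ∀ (c : Nat) (L : List (Option (List Char))), 1 ≤ c → c ≤ n1 → L.length = n1 + 1 →
      (∀ j : Nat, j < c → L[j]? = some (bestRec P j)) →
      (∀ j : Nat, c ≤ j → j ≤ n1 → L[j]? = some (init j)) →
      (fun best i => PySem.List.pySetD best i (solveAltCell best i P)) L (c : Int)
        = PySem.List.pySetD L (c : Int) (bestRec P c) := by
    intro c L hc1 hcn hlen hcellsR hcellsI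
    beta_reduce
    rw [innerB P hP c hc1 L hcellsR]
  have hmain := outer_table n1 (bestRec P) init
    (fun best i => PySem.List.pySetD best i (solveAltCell best i P))
    L0 hL0len hL0cells h0 hF n1 (le_refl _)
  have hrange : (n : Int) + 1 = ((n1 : Int) + 1) := by omega
  rw [hrange]
  apply List.ext_getElem?
  intro j
  rcases Nat.lt_or_ge j (n1 + 1) with hj | hj
  · rw [hmain.2 j (by omega), if_pos (by omega)]
    rw [List.getElem?_eq_getElem (by simp; omega)]
    simp
  · rw [List.getElem?_eq_none (by rw [hmain.1]; omega),
      List.getElem?_eq_none (by simp; omega)]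

-- ===== the reachability precondition names exactly the cells where B's dp is populated =====

theorem length_reachTable (cs : List Int) (i : Nat) : (reachTable cs i).length = i + 1 := by
  induction i with
  | zero => rfl
  | succ i ih => simp [reachTable, ih]

theorem reachTable_prefix (cs : List Int) (i j : Nat) (h : j ≤ i) :
    (reachTable cs i).getD j false = reachCosts cs j := by
  induction i with
  | zero =>
    interval_cases j
    rfl
  | succ i ih =>
    rcases Nat.lt_or_ge j (i + 1) with hj | hj
    · rw [show reachTable cs (i + 1) = reachTable cs i ++ [_] from rfl]
      rw [List.getD, List.getElem?_append_left (by rw [length_reachTable]; omega)]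
      exact ih (by omega)
    · have : j = i + 1 := by omega
      subst this
      rfl

theorem reach_rec (cs : List Int) (i : Nat) :
    reachCosts cs (i + 1) = true ↔
      ∃ v ∈ cs, 1 ≤ v ∧ v ≤ (i + 1 : Int) ∧ reachCosts cs (i + 1 - v.toNat) = true := by
  have hx : reachCosts cs (i + 1) =
      cs.any (fun v => decide (1 ≤ v) && decide (v ≤ (i + 1 : Int)) &&
        (reachTable cs i).getD (i + 1 - v.toNat) false) := by
    unfold reachCosts
    rw [show reachTable cs (i + 1) = reachTable cs i ++ [_] from rfl]
    rw [List.getD, List.getElem?_append_right (by rw [length_reachTable])]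
    simp [length_reachTable]
  rw [hx, List.any_eq_true]
  constructor
  · rintro ⟨v, hv, hb⟩
    simp only [Bool.and_eq_true, decide_eq_true_eq] at hb
    obtain ⟨⟨h1, h2⟩, h3⟩ := hb
    rw [reachTable_prefix cs i (i + 1 - v.toNat) (by omega)] at h3
    exact ⟨v, hv, h1, h2, h3⟩
  · rintro ⟨v, hv, h1, h2, h3⟩
    refine ⟨v, hv, ?_⟩
    simp only [Bool.and_eq_true, decide_eq_true_eq]
    rw [reachTable_prefix cs i (i + 1 - v.toNat) (by omega)]
    exact ⟨⟨h1, h2⟩, h3⟩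

theorem reach_iff (cs : List Int) (P : List (Int × Int))
    (hcs : ∀ v : Int, v ∈ cs ↔ ∃ d, (d, v) ∈ P)
    (hP : ∀ p ∈ P, 2 ≤ p.2 ∧ p.2 ≤ 7) (i : Nat) :
    reachCosts cs i = true ↔ (bestRec P i).isSome = true := by
  induction i using Nat.strong_induction_on with
  | _ i ih =>
    match i with
    | 0 => simp [reachCosts, reachTable, bestRec_zero]
    | (j + 1) =>
      rw [reach_rec]
      have hne : (j + 1 : Nat) ≠ 0 := by omega
      constructor
      · rintro ⟨v, hv, h1, h2, h3⟩
        obtain ⟨d, hdP⟩ := (hcs v).mp hv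
        have hpred : (bestRec P (j + 1 - v.toNat)).isSome = true :=
          (ih _ (by omega)).mp h3
        rw [bestRec_eq P (j + 1) hne]
        cases hres : List.foldl (bstep (bF P (j + 1))) none P with
        | some t => simp
        | none =>
          exfalso
          have hFnone := ((bfold_none (bF P (j + 1)) P none).mp hres).2 (d, v) hdP
          rw [bF] at hFnone
          rw [if_pos (show (1 : Int) ≤ (d, v).2 ∧ (d, v).2 ≤ ((j + 1 : Nat) : Int)
            from ⟨h1, h2⟩)] at hFnone
          obtain ⟨t, ht⟩ := Option.isSome_iff_exists.mp hpred
          rw [show ((d, v).2 : Int).toNat = v.toNat from rfl, ht] at hFnone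
          cases hFnone
      · intro hs
        obtain ⟨t, ht⟩ := Option.isSome_iff_exists.mp hs
        rw [bestRec_eq P (j + 1) hne] at ht
        rcases bfold_sources _ _ _ _ ht with h1 | ⟨p, hp, hFp⟩
        · cases h1
        · rw [bF_eq_some] at hFp
          obtain ⟨hp1, hp2, t', ht', -⟩ := hFp
          refine ⟨p.2, (hcs p.2).mpr ⟨p.1, by simpa using hp⟩, hp1, hp2, ?_⟩
          refine (ih _ (by omega)).mpr ?_
          rw [ht']
          rfl

-- ===== the shared dict of usable digits =====

theorem dict_get_build (a_list : List Int) (g : Int → Int) (d0 : PySem.Dict Int Int) (k : Int) :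
    (a_list.foldl (fun d a => d.insert a (g a)) d0).get? k =
      if k ∈ a_list then some (g k) else d0.get? k := by
  induction a_list generalizing d0 with
  | nil => simp
  | cons a rest ih =>
    simp only [List.foldl_cons, ih, List.mem_cons]
    by_cases hk : k ∈ rest
    · rw [if_pos hk, if_pos (Or.inr hk)]
    · rw [if_neg hk]
      by_cases he : k = a
      · subst he
        rw [if_pos (Or.inl rfl), PySem.Dict.get?_insert_self]
      · rw [if_neg (by tauto), PySem.Dict.get?_insert_of_ne]
        simp only [ne_eq]
        omega

theorem numbersMap_getD (d : Int) (h1 : 1 ≤ d) (h9 : d ≤ 9) :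
    (PySem.Dict.ofList [((1 : Int), (2 : Int)), (2, 5), (3, 5), (4, 4), (5, 5), (6, 6), (7, 3),
      (8, 7), (9, 6)]).getD d 0 = digitCost d := by
  interval_cases d <;> decide

-- ===== VERDICT (by name: the statement is the Claim_ definition above) =====
theorem solve_spec : Claim_equal_solve := by
  intro n a_list hdom hpre
  obtain ⟨hdig, hreach⟩ := hpre
  unfold Spec_solve solve solve_alt
  dsimp only
  set NM : PySem.Dict Int Int :=
    PySem.Dict.ofList [(1, 2), (2, 5), (3, 5), (4, 4), (5, 5), (6, 6), (7, 3), (8, 7), (9, 6)]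
    with hNM
  set uM : PySem.Dict Int Int :=
    a_list.foldl (fun d a => d.insert a (NM.getD a 0)) PySem.Dict.empty with huM
  set P : List (Int × Int) := PySem.List.sorted uM.items (fun p => p.1) true with hPdef
  set vals : List Int := uM.values with hvals
  have hnodup : uM.keys.Nodup := by
    rw [huM]
    exact PySem.Dict.nodup_keys_foldl_insert a_list (fun d a => NM.getD a 0) PySem.Dict.empty
      PySem.Dict.nodup_keys_empty
  have hitems : ∀ dd vv : Int, ((dd, vv) ∈ uM.items) ↔ (dd ∈ a_list ∧ vv = digitCost dd) := by
    intro dd vv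
    rw [← PySem.Dict.get?_eq_some_iff_mem_items _ _ _ hnodup, huM, dict_get_build]
    split_ifs with hmem
    · have hd := hdig dd hmem
      rw [numbersMap_getD dd hd.1 hd.2]
      simp only [Option.some.injEq]
      constructor
      · intro h
        exact ⟨hmem, h.symm⟩
      · rintro ⟨-, rfl⟩
        rfl
    · constructor
      · intro h
        cases h
      · rintro ⟨hm, -⟩
        exact absurd hm hmem
  have hmemP : ∀ q : Int × Int, q ∈ P ↔ q ∈ uM.items := fun q =>
    (PySem.List.sorted_perm uM.items _ true).mem_iff
  have hP9 : ∀ p ∈ P, (1 ≤ p.1 ∧ p.1 ≤ 9) ∧ 2 ≤ p.2 ∧ p.2 ≤ 7 := by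
    intro p hp
    obtain ⟨hmem, hcost⟩ := (hitems p.1 p.2).mp (by simpa using (hmemP p).mp hp)
    have hd := hdig _ hmem
    exact ⟨hd, by rw [hcost]; exact digitCost_range _ hd.1 hd.2⟩
  have hkeysnodup : (P.map (fun p => p.1)).Nodup := by
    have hit : (uM.items.map (fun p => p.1)).Nodup := hnodup
    exact (List.Perm.nodup_iff ((PySem.List.sorted_perm uM.items (fun p => p.1) true).map _)).mpr
      hit
  have hdesc : P.Pairwise (fun p q => q.1 < p.1) := by
    have h1 := PySem.List.sorted_pairwise_rev uM.items (fun p => p.1)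
    have h2 : P.Pairwise (fun p q => p.1 ≠ q.1) := List.pairwise_map.mp hkeysnodup
    exact (h1.and h2).imp (fun h => lt_of_le_of_ne h.1 (Ne.symm h.2))
  have hvP : ∀ v : Int, v ∈ vals ↔ ∃ dd, (dd, v) ∈ P := by
    intro v
    constructor
    · intro hv
      have hv' : v ∈ uM.items.map (fun p => p.2) := hv
      obtain ⟨q, hq, rfl⟩ := List.mem_map.mp hv'
      exact ⟨q.1, (hmemP _).mpr (by simpa using hq)⟩
    · rintro ⟨dd, hddP⟩
      have hq := (hmemP _).mp hddP
      show v ∈ uM.items.map (fun p => p.2)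
      exact List.mem_map.mpr ⟨(dd, v), hq, rfl⟩
  have hvals27 : ∀ v ∈ vals, 2 ≤ v ∧ v ≤ 7 := by
    intro v hv
    obtain ⟨dd, h⟩ := (hvP v).mp hv
    exact (hP9 (dd, v) h).2
  have hcs : ∀ v : Int, v ∈ (PySem.List.dedup a_list).map digitCost ↔ ∃ dd, (dd, v) ∈ P := by
    intro v
    rw [List.mem_map]
    constructor
    · rintro ⟨a, ha, rfl⟩
      have ha' := (PySem.List.mem_dedup a_list a).mp ha
      exact ⟨a, (hmemP _).mpr ((hitems a (digitCost a)).mpr ⟨ha', rfl⟩)⟩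
    · rintro ⟨dd, hdd⟩
      obtain ⟨hmem, hcost⟩ := (hitems dd v).mp ((hmemP _).mp hdd)
      exact ⟨dd, (PySem.List.mem_dedup a_list dd).mpr hmem, hcost.symm⟩
  by_cases hn0 : n ≤ 0
  · rw [show n.toNat + 1 = 0 + 1 by omega]
    rw [solveReconLoop]
    rw [reconStep_none _ _ _ (fun p hp => by have := (hP9 p hp).2.1; omega)]
    rw [if_pos hn0, if_neg (by omega)]
    rfl
  · have hn0' : 0 < n := by omega
    have hn1 : (1 : Int) ≤ n := by omega
    replace hreach := hreach.resolve_left (by omega)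
    have hsome := (reach_iff _ P hcs (fun p hp => (hP9 p hp).2) n.toNat).mp hreach
    obtain ⟨t, ht⟩ := Option.isSome_iff_exists.mp hsome
    rw [dpList_eq n hn1 vals hvals27, bestList_eq n hn1 P (fun p hp => (hP9 p hp).2)]
    have hloop := recon_loop n vals P hvP hP9 hdesc t n.toNat [] (n.toNat + 1) ht
      (by omega) (by omega)
      (by have := ((main_M vals P hvP hP9 n.toNat).1 t ht).2.2; omega)
    rw [show ((n.toNat : Nat) : Int) = n by omega] at hloop
    rw [hloop, if_pos hn0']
    have hget : PySem.List.pyGetD ((List.range (n.toNat + 1)).map (bestRec P)) n none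
        = some t := by
      rw [getD_map_range _ _ _ _ (by omega) (by push_cast; omega)]
      exact ht
    rw [hget]
    apply String.toList_inj.mp
    rw [PySem.Str.toList_join, String.toList_ofList]
    simp only [List.nil_append, List.map_map, Function.comp_def, String.toList_ofList]
    exact PySem.Chars.join_nil_singletons t
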